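-- pv_equiv track=rewrite | github.com/Marina2401/loops | 190720/lr/10/10.1.py | check
-- ===== SOURCE A (Python) =====
-- def check(a, n):
--     i = 0
--     b = []
--     while i < n:
--         for j in range(i+1, n):
--             if a[i] == a[j]:
--                 b.append(a[i])
--         i += 1
--     return b
-- ===== SOURCE B (Python) =====
-- def check(a, n):
--     prefix = a[:max(n, 0)]
--     cnt = {}
--     for x in prefix:
--         cnt[x] = cnt.get(x, 0) + 1
--     b = []
--     for x in prefix:
--         c = cnt[x] - 1
--         cnt[x] = c
--         b.extend([x] * c)
--     return b
-- ===== Notes on version B (the rewrite author's own statement) =====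
-- stated objective: faster
-- what changed: Replaced the O(n^2) nested index loops (for each i scan all later j for equal values) by a single dict counting pass over a[:n] followed by one emitting pass that appends each element 'remaining equal count' times.
import Mathlib
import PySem

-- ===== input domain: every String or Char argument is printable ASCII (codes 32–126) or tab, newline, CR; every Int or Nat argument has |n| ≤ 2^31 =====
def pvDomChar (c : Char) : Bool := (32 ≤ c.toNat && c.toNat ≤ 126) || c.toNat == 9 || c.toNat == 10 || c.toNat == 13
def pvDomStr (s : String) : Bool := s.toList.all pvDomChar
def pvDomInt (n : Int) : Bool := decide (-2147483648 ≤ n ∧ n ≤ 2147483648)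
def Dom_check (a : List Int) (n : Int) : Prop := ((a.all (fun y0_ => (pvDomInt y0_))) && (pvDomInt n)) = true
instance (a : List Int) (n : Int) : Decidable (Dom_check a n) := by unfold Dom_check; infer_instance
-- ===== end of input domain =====

-- B replaces A's nested index scan by one dict counting pass plus one emitting pass
-- (each a[i] is appended 'remaining equal count' times) — objective: faster.

-- ===== PORT A =====
-- while i < n … for j in range(i+1, n): if a[i] == a[j]: b.append(a[i])
def check (a : List Int) (n : Int) : List Int :=
  (PySem.List.pyRange 0 n 1).foldl
    (fun b i =>
      (PySem.List.pyRange (i + 1) n 1).foldl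
        (fun b j =>
          if PySem.List.pyGetD a i 0 = PySem.List.pyGetD a j 0 then
            b ++ [PySem.List.pyGetD a i 0]
          else b)
        b)
    []

-- ===== PORT B =====
-- pre = a[:max(n,0)]; count each value into a dict; then for each x emit x (remaining count) times
def check_alt (a : List Int) (n : Int) : List Int :=
  let pre := PySem.List.slice a none (some (max n 0))
  let cnt := pre.foldl (fun d x => d.insert x (d.getD x 0 + 1))
    (PySem.Dict.empty : PySem.Dict Int Int)
  (pre.foldl
    (fun (st : PySem.Dict Int Int × List Int) x =>
      let c := st.1.getD x 0 - 1
      (st.1.insert x c, st.2 ++ List.replicate c.toNat x))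
    (cnt, ([] : List Int))).2

-- ===== PRECONDITION & SPEC =====
-- A raises IndexError exactly when 2 ≤ n and n > len(a) (the inner loop then reads a[n-1]);
-- for n ≤ 1 the body never indexes, so A returns [] even on a shorter list.
def Pre_check (a : List Int) (n : Int) : Prop := n ≤ (a.length : Int) ∨ n ≤ 1
instance (a : List Int) (n : Int) : Decidable (Pre_check a n) := by unfold Pre_check; infer_instance
def pvWitness_check : List Int × Int := ([1, 2, 1, 2, 1], 5)

def Spec_check (a : List Int) (n : Int) (out : List Int) : Prop := out = check_alt a n
instance (a : List Int) (n : Int) (out : List Int) : Decidable (Spec_check a n out) := by unfold Spec_check; infer_instance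

-- ===== CLAIM (what is proved, stated in full; the proofs are below) =====
def Claim_equal_check : Prop := ∀ (a : List Int) (n : Int), Dom_check a n → Pre_check a n → Spec_check a n (check a n)

-- ===== LEMMAS AND PROOFS =====

-- common specification: for each element, (its later-equal count) copies of it, front to back
def specF : List Int → List Int
  | [] => []
  | x :: xs => List.replicate (xs.count x) x ++ specF xs

-- B's emitting loop, started with a correct remaining-count dict, realises specF
lemma alt_loop (r : List Int) : ∀ (acc : List Int) (d : PySem.Dict Int Int),
    (∀ x, d.getD x 0 = (r.count x : Int)) →
    (r.foldl
      (fun (st : PySem.Dict Int Int × List Int) x =>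
        let c := st.1.getD x 0 - 1
        (st.1.insert x c, st.2 ++ List.replicate c.toNat x))
      (d, acc)).2 = acc ++ specF r := by
  induction r with
  | nil => intro acc d _; simp [specF]
  | cons x xs ih =>
    intro acc d h
    have hx : d.getD x 0 - 1 = (xs.count x : Int) := by
      have := h x; rw [List.count_cons_self] at this; push_cast at this; omega
    have hcnt : ∀ y, (d.insert x ((xs.count x : Int))).getD y 0 = (xs.count y : Int) := by
      intro y
      rw [PySem.Dict.getD_insert]
      by_cases hy : y = x
      · simp [hy]
      · rw [if_neg hy, h y, List.count_cons_of_ne (fun h' => hy h'.symm)]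
    have hstep := ih (acc ++ List.replicate (xs.count x) x) (d.insert x ((xs.count x : Int))) hcnt
    simp only [List.foldl_cons]
    rw [hx, Int.toNat_natCast]
    simp only [specF]
    rw [← List.append_assoc]
    exact hstep

lemma alt_eq_spec (a : List Int) (n : Int) :
    check_alt a n = specF (PySem.List.slice a none (some (max n 0))) := by
  unfold check_alt
  refine alt_loop _ _ _ ?_
  intro x
  rw [PySem.Dict.getD_foldl_insert_add_one]
  simp [PySem.Dict.getD, PySem.Dict.get?, PySem.Dict.empty]

-- A's conditional-append inner loop accumulates one copy of x per equal element of l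
lemma inner_fold (x : Int) (l : List Int) : ∀ (b : List Int),
    l.foldl (fun b y => if x = y then b ++ [x] else b) b = b ++ List.replicate (l.count x) x := by
  induction l with
  | nil => intro b; simp
  | cons y ys ih =>
    intro b
    simp only [List.foldl_cons]
    by_cases hxy : x = y
    · subst hxy
      rw [if_pos rfl, ih, List.count_cons_self]
      simp [List.replicate_succ, List.append_assoc]
    · rw [if_neg hxy, ih, List.count_cons_of_ne (fun h' => hxy h'.symm)]

-- the index-driven outer loop over a whole list p computes specF p
lemma rangeFold (p : List Int) : ∀ (acc : List Int),
    (List.range p.length).foldl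
      (fun b k => b ++ List.replicate ((p.drop (k + 1)).count (p.getD k 0)) (p.getD k 0)) acc
    = acc ++ specF p := by
  induction p with
  | nil => intro acc; simp [specF]
  | cons x xs ih =>
    intro acc
    rw [List.length_cons, List.range_succ_eq_map]
    simp only [List.foldl_cons, List.foldl_map]
    rw [show (fun (b : List Int) (k : Nat) =>
          b ++ List.replicate (((x :: xs).drop (Nat.succ k + 1)).count ((x :: xs).getD (Nat.succ k) 0)) ((x :: xs).getD (Nat.succ k) 0))
        = (fun (b : List Int) (k : Nat) =>
          b ++ List.replicate ((xs.drop (k + 1)).count (xs.getD k 0)) (xs.getD k 0)) by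
        funext b k; simp [Nat.succ_eq_add_one]]
    rw [ih]
    simp [specF]

lemma check_eq_spec (a : List Int) (N : Nat) (hlen : N ≤ a.length) :
    check a (N : Int) = specF (a.take N) := by
  set p := a.take N with hp
  have hplen : p.length = N := by rw [hp, List.length_take, Nat.min_eq_left hlen]
  have hag : ∀ (j : Int), 0 ≤ j → j < (p.length : Int) →
      PySem.List.pyGetD a j 0 = PySem.List.pyGetD p j 0 := by
    intro j hj0 hjlt
    have hjp : j.toNat < p.length := by omega
    have hja : j < (a.length : Int) := by
      have : p.length ≤ a.length := by rw [hplen] at hjp ⊢; omega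
      omega
    rw [PySem.List.pyGetD_eq_getElem a 0 hj0 hja,
        PySem.List.pyGetD_eq_getElem p 0 hj0 hjlt]
    simp only [hp, List.getElem_take]
  have hNp : (N : Int) = (p.length : Int) := by rw [hplen]
  unfold check
  rw [hNp, PySem.List.pyRange_zero_nat, List.foldl_map]
  refine Eq.trans (PySem.List.foldl_congr_mem _ _ _ _ ?_) (rangeFold p [])
  intro b k hk
  have hklt : k < p.length := List.mem_range.mp hk
  have hx : PySem.List.pyGetD a (k : Int) 0 = p.getD k 0 := by
    rw [hag (k : Int) (by positivity) (by exact_mod_cast hklt), PySem.List.pyGetD_natCast]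
  rw [hx]
  rw [PySem.List.foldl_congr_mem _ _
      (fun (b : List Int) (j : Int) =>
        if p.getD k 0 = PySem.List.pyGetD p j 0 then b ++ [p.getD k 0] else b) b ?_]
  · rw [PySem.List.foldl_pyRange_pyGetD' p 0
        (fun b y => if p.getD k 0 = y then b ++ [p.getD k 0] else b) b
        (show (0:Int) ≤ (k : Int) + 1 by positivity)]
    rw [show ((k : Int) + 1).toNat = k + 1 by omega]
    exact inner_fold (p.getD k 0) (p.drop (k + 1)) b
  · intro b' j hj
    rcases PySem.List.mem_pyRange_one.mp hj with ⟨hj1, hj2⟩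
    rw [hag j (by omega) hj2]

-- ===== VERDICT (by name: the statement is the Claim_ definition above) =====
theorem check_spec : Claim_equal_check := by
  intro a n _ hpre
  unfold Spec_check
  rw [alt_eq_spec]
  by_cases h0 : n ≤ 0
  · have hm : max n 0 = 0 := by omega
    rw [hm, PySem.List.slice_to a le_rfl]
    have hc : check a n = [] := by
      unfold check; rw [PySem.List.pyRange_one_eq_nil h0]; rfl
    rw [hc]; simp [specF]
  · replace h0 : 0 < n := by omega
    have hm : max n 0 = n := by omega
    rw [hm, PySem.List.slice_to a h0.le]
    have hn : n = ((n.toNat : Nat) : Int) := by omega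
    rcases hpre with hle | h1
    · rw [hn]
      exact check_eq_spec a n.toNat (by omega)
    · have hn1 : n = 1 := by omega
      subst hn1
      cases a with
      | nil => rfl
      | cons x xs =>
        rw [show (1 : Int) = ((1 : Nat) : Int) from rfl]
        exact check_eq_spec (x :: xs) 1 (by simp)
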